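-- pv_equiv track=rewrite | github.com/end-y/xmlCorrector | main.py | addApostroph
-- ===== SOURCE A (Python) =====
-- def addApostroph(arr):
--     new = []
--     for i in range(len(arr)):
--         s = arr[i].split(" ")
--         for str in range(len(arr[i])):
--             if arr[i][str] == "=":
--                 if arr[i][str + 1] != "\"":
--                     for o in range(len(s)):
--                         if s[o].find("\"") == -1 and s[o].find("=") != -1:
--                             s[o] = s[o].split("=")[0] + "=" + "\"" + s[o].split("=")[1] + "\""
--         arr[i] = " ".join(s)
--     return "\n".join(arr)
-- ===== SOURCE B (Python) =====
-- def addApostroph(arr):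
--     # Structurally different re-implementation: per line, one adjacent-pair scan
--     # decides whether the line needs fixing, then a single conditional map over
--     # the space-split words rewrites each fixable word once.
--     # Unlike A, this does not mutate arr in place (return value is the same).
--     def fix_word(w):
--         if '"' in w or '=' not in w:
--             return w
--         head, _, tail = w.partition('=')
--         return head + '="' + tail.split('=')[0] + '"'
--
--     out = []
--     for line in arr:
--         if any(a == '=' and b != '"' for a, b in zip(line, line[1:])):
--             out.append(' '.join(fix_word(w) for w in line.split(' ')))
--         else:
--             out.append(line)
--     return '\n'.join(out)
-- ===== Notes on version B (the rewrite author's own statement) =====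
-- stated objective: simpler
-- what changed: A rescans and rewrites the whole word list once for every '=' character of the line (word-fix loop nested inside the character scan, with repeated find/split calls); B makes one adjacent-pair scan per line to decide whether it needs fixing and then rewrites the words in a single conditional map using partition.
import Mathlib
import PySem

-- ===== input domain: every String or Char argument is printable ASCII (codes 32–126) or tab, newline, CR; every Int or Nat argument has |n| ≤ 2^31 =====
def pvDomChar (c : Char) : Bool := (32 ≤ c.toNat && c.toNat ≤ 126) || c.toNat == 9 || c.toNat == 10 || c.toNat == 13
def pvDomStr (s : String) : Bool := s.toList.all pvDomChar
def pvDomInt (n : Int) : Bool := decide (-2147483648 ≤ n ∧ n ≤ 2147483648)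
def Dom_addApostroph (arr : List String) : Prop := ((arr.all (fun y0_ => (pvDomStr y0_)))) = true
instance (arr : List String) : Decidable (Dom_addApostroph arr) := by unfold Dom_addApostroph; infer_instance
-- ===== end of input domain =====

-- B replaces A's word-fix loop nested inside the character scan by one adjacent-pair scan
-- that decides whether the line needs fixing, followed by a single conditional map over the
-- words (objective: simpler/alternative).  A mutates its argument list in place; B does not —
-- the equivalence proved here is about the RETURN value only.

-- ===== PORT A =====
-- s[o].split("=")[0] + "=" + "\"" + s[o].split("=")[1] + "\""  (guard ensures both pieces exist)
def pvFixA (w : String) : String :=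
  let pieces := (PySem.Str.split? w "=").getD []
  PySem.List.pyGetD pieces 0 "" ++ "=" ++ "\"" ++ PySem.List.pyGetD pieces 1 "" ++ "\""

-- the body of A's outer loop for one line: split, char scan with the nested word-fixing
-- index loop, rejoin
def pvLineA (line : String) : String :=
  let s0 := (PySem.Str.split? line " ").getD []
  let s1 := (PySem.List.pyRange 0 (PySem.Str.len line) 1).foldl
    (fun s j =>
      if PySem.Str.pyGet? line j = some '=' then
        if PySem.Str.pyGet? line (j + 1) ≠ some '"' then
          (PySem.List.pyRange 0 ((s.length : Int)) 1).foldl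
            (fun t o =>
              if PySem.Str.find (PySem.List.pyGetD t o "") "\"" = -1 ∧
                  PySem.Str.find (PySem.List.pyGetD t o "") "=" ≠ -1 then
                PySem.List.pySetD t o (pvFixA (PySem.List.pyGetD t o ""))
              else t) s
        else s
      else s) s0
  PySem.Str.join " " s1

def addApostroph (arr : List String) : String :=
  PySem.Str.join "\n"
    ((PySem.List.pyRange 0 (arr.length : Int) 1).foldl
      (fun a i => PySem.List.pySetD a i (pvLineA (PySem.List.pyGetD a i ""))) arr)

-- ===== PORT B =====
-- fix_word: hand port of str.partition('=') (exact: pieces around the FIRST '='; the guard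
-- guarantees '=' occurs), then tail.split('=')[0]
def pvFixB (w : String) : String :=
  if PySem.Str.isIn "\"" w || !PySem.Str.isIn "=" w then w
  else
    let head := String.ofList (w.toList.takeWhile (fun c => c ≠ '='))
    let tail := String.ofList ((w.toList.dropWhile (fun c => c ≠ '=')).drop 1)
    head ++ "=\"" ++ PySem.List.pyGetD ((PySem.Str.split? tail "=").getD []) 0 "" ++ "\""

-- one adjacent-pair scan (zip(line, line[1:])) decides; then a single map over the words
def pvLineB (line : String) : String :=
  if (line.toList.zip (PySem.List.slice line.toList (some 1) none)).any
      (fun p => p.1 == '=' && p.2 != '"') then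
    PySem.Str.join " " (((PySem.Str.split? line " ").getD []).map pvFixB)
  else line

def addApostroph_alt (arr : List String) : String :=
  PySem.Str.join "\n" (arr.map pvLineB)

-- ===== PRECONDITION & SPEC =====
-- Pre_ excludes exactly the inputs on which A raises IndexError: a line whose last
-- character is '=' makes A read line[j+1] past the end during its character scan.
def Pre_addApostroph (arr : List String) : Prop :=
  ∀ s ∈ arr, PySem.Str.endswith s "=" = false
instance (arr : List String) : Decidable (Pre_addApostroph arr) := by
  unfold Pre_addApostroph; infer_instance

def pvWitness_addApostroph : List String := ["<tag a=1 b=\"2\">", "plain text"]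

def Spec_addApostroph (arr : List String) (out : String) : Prop := out = addApostroph_alt arr
instance (arr : List String) (out : String) : Decidable (Spec_addApostroph arr out) := by
  unfold Spec_addApostroph; infer_instance

-- ===== CLAIM (what is proved, stated in full; the proofs are below) =====
def Claim_equal_addApostroph : Prop := ∀ (arr : List String), Dom_addApostroph arr →
  Pre_addApostroph arr → Spec_addApostroph arr (addApostroph arr)

-- ===== LEMMAS AND PROOFS =====

def pvSplitC (c : Char) (l : List Char) : List (List Char) :=
  if h : l.dropWhile (fun x => x ≠ c) = [] then [l.takeWhile (fun x => x ≠ c)]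
  else l.takeWhile (fun x => x ≠ c) :: pvSplitC c ((l.dropWhile (fun x => x ≠ c)).drop 1)
termination_by l.length
decreasing_by
  have h1 : (l.dropWhile (fun x => x ≠ c)).length ≤ l.length := List.length_dropWhile_le _ _
  have h2 : 0 < (l.dropWhile (fun x => x ≠ c)).length := List.length_pos_iff.mpr h
  simp only [List.length_drop]; omega

theorem pv_go_eq (c : Char) : ∀ (fuel : Nat) (l cur : List Char) (acc : List (List Char)), l.length < fuel →
    PySem.Chars.splitOn.go [c] fuel l cur acc =
      acc.reverse ++ List.modifyHead (fun p => cur.reverse ++ p) (pvSplitC c l) := by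
  intro fuel
  induction fuel with
  | zero => intro l cur acc h; omega
  | succ n ih =>
    intro l cur acc h
    cases l with
    | nil =>
      rw [PySem.Chars.splitOn.go.eq_2 _ _ _ _ (by omega)]
      simp [pvSplitC]
    | cons a rest =>
      rw [PySem.Chars.splitOn.go.eq_3]
      by_cases hac : a = c
      · subst hac
        have hpre : [a].isPrefixOf (a :: rest) = true := by simp [List.isPrefixOf]
        rw [if_pos hpre]
        rw [ih _ _ _ (by simp at h ⊢; omega)]
        have hsplit : pvSplitC a (a :: rest) = [] :: pvSplitC a rest := by
          rw [pvSplitC]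
          simp [List.dropWhile, List.takeWhile]
        rw [hsplit]
        cases hh : pvSplitC a rest <;> simp [hh]
      · have hpre : [c].isPrefixOf (a :: rest) = false := by
          simp [List.isPrefixOf]; exact fun hh => absurd hh.symm hac
        rw [if_neg (by simp [hpre])]
        rw [ih _ _ _ (by simp at h ⊢; omega)]
        have htw : (a :: rest).takeWhile (fun x => x ≠ c) = a :: rest.takeWhile (fun x => x ≠ c) := by
          simp [List.takeWhile, hac]
        have hdw : (a :: rest).dropWhile (fun x => x ≠ c) = rest.dropWhile (fun x => x ≠ c) := by
          simp [List.dropWhile, hac]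
        have hsplit : pvSplitC c (a :: rest) =
            List.modifyHead (fun p => a :: p) (pvSplitC c rest) := by
          rw [pvSplitC]
          conv_rhs => rw [pvSplitC]
          rw [htw, hdw]
          split <;> simp
        rw [hsplit]
        cases hrest : pvSplitC c rest with
        | nil => simp
        | cons p ps => simp

theorem pv_splitOn_eq (c : Char) (l : List Char) :
    PySem.Chars.splitOn l [c] = pvSplitC c l := by
  unfold PySem.Chars.splitOn
  rw [pv_go_eq c (l.length + 1) l [] [] (by omega)]
  cases hh : pvSplitC c l <;> simp [hh]

theorem pvSplitC_ne_nil (c : Char) (l : List Char) : pvSplitC c l ≠ [] := by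
  unfold pvSplitC; split <;> simp

theorem pv_join_splitC (c : Char) (l : List Char) :
    PySem.Chars.join [c] (pvSplitC c l) = l := by
  rw [pvSplitC]
  split
  · rename_i h
    rw [PySem.Chars.join_singleton]
    conv_rhs => rw [← List.takeWhile_append_dropWhile (p := fun x => x ≠ c) (l := l)]
    rw [h, List.append_nil]
  · rename_i h
    have hd : l.dropWhile (fun x => x ≠ c) = c :: (l.dropWhile (fun x => x ≠ c)).drop 1 := by
      cases hdw : l.dropWhile (fun x => x ≠ c) with
      | nil => exact absurd hdw h
      | cons x xs =>
        have hx := List.head_dropWhile_not (p := fun x => x ≠ c) (l := l) (by rw [hdw]; simp)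
        simp only [hdw, List.head_cons, decide_eq_false_iff_not, not_not] at hx
        simp [hx]
    cases hs : pvSplitC c ((l.dropWhile (fun x => x ≠ c)).drop 1) with
    | nil => exact absurd hs (pvSplitC_ne_nil c _)
    | cons p ps =>
      rw [PySem.Chars.join_cons_cons, ← hs,
        pv_join_splitC c ((l.dropWhile (fun x => x ≠ c)).drop 1)]
      conv_rhs => rw [← List.takeWhile_append_dropWhile (p := fun x => x ≠ c) (l := l)]
      conv_rhs => rw [hd]
      simp
termination_by l.length
decreasing_by
  have h1 : (l.dropWhile (fun x => x ≠ c)).length ≤ l.length := List.length_dropWhile_le _ _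
  have h2 : 0 < (l.dropWhile (fun x => x ≠ c)).length := List.length_pos_iff.mpr (by assumption)
  simp only [List.length_drop]; omega

theorem pv_foldset {α : Type} (cond : α → Bool) (tr : α → α) (d : α) :
    ∀ (b a : List α),
      (PySem.List.pyRange (a.length : Int) ((a.length : Int) + (b.length : Int)) 1).foldl
        (fun s o => if cond (PySem.List.pyGetD s o d) then
            PySem.List.pySetD s o (tr (PySem.List.pyGetD s o d)) else s)
        (a.map (fun x => if cond x then tr x else x) ++ b) =
      (a ++ b).map (fun x => if cond x then tr x else x) := by
  intro b
  induction b with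
  | nil => intro a; simp [PySem.List.pyRange_one_eq_nil]
  | cons x b ih =>
    intro a
    rw [PySem.List.pyRange_one_cons (by simp only [List.length_cons]; push_cast; omega)]
    rw [List.foldl_cons]
    have hget : PySem.List.pyGetD (a.map (fun x => if cond x then tr x else x) ++ x :: b)
        ((a.length : Int)) d = x := by
      have : (a.length : Int) = ((a.map (fun x => if cond x then tr x else x)).length : Int) := by simp
      rw [this, PySem.List.pyGetD_natCast]
      simp [List.getD_eq_getElem?_getD, List.getElem?_append_right]
    rw [hget]
    have hstep : (if cond x then
        PySem.List.pySetD (a.map (fun x => if cond x then tr x else x) ++ x :: b)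
          ((a.length : Int)) (tr x)
      else (a.map (fun x => if cond x then tr x else x) ++ x :: b)) =
        ((a ++ [x]).map (fun x => if cond x then tr x else x) ++ b) := by
      by_cases hc : cond x = true
      · rw [if_pos hc]
        have : (a.length : Int) = ((a.map (fun x => if cond x then tr x else x)).length : Int) := by simp
        rw [this, PySem.List.pySetD_natCast]
        simp [hc]
      · rw [if_neg hc]
        simp [hc]
    rw [hstep]
    have hrange : PySem.List.pyRange ((a.length : Int) + 1) ((a.length : Int) + ((x :: b).length : Int)) 1
        = PySem.List.pyRange (((a ++ [x]).length : Int)) (((a ++ [x]).length : Int) + (b.length : Int)) 1 := by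
      congr 1
      · push_cast; simp
      · simp only [List.length_cons, List.length_append, List.length_nil]; push_cast; omega
    rw [hrange, ih (a ++ [x])]
    simp

theorem pv_foldset_zero {α : Type} (cond : α → Bool) (tr : α → α) (d : α) (b : List α) :
    (PySem.List.pyRange 0 ((b.length : Int)) 1).foldl
        (fun s o => if cond (PySem.List.pyGetD s o d) then
            PySem.List.pySetD s o (tr (PySem.List.pyGetD s o d)) else s) b =
      b.map (fun x => if cond x then tr x else x) := by
  have := pv_foldset cond tr d b []
  simpa using this

theorem pvSplitC_cons_of_mem (c : Char) (l : List Char) (h : c ∈ l) :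
    pvSplitC c l = l.takeWhile (fun x => x ≠ c) ::
      pvSplitC c ((l.dropWhile (fun x => x ≠ c)).drop 1) := by
  rw [pvSplitC]
  rw [dif_neg]
  intro hnil
  rw [List.dropWhile_eq_nil_iff] at hnil
  have := hnil c h
  simp at this

theorem pv_pieces (w : String) (c : Char) (sep : String) (hsep : sep.toList = [c]) :
    (PySem.Str.split? w sep).getD [] = (pvSplitC c w.toList).map String.ofList := by
  have h := PySem.Str.split?_map w sep
  have h2 : PySem.Chars.split? w.toList sep.toList = some (pvSplitC c w.toList) := by
    unfold PySem.Chars.split?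
    rw [if_neg (by simp [hsep])]
    rw [hsep, pv_splitOn_eq]
  rw [h2] at h
  cases hs : PySem.Str.split? w sep with
  | none => rw [hs] at h; simp at h
  | some ps =>
    rw [hs] at h
    simp only [Option.map_some, Option.some.injEq] at h
    simp only [Option.getD_some]
    rw [← h, List.map_map]
    have : (String.ofList ∘ String.toList) = id := by
      funext s; simp [String.ofList_toList]
    rw [this, List.map_id]

theorem pv_fix_eq (w : String) :
    pvFixB w = if PySem.Str.find w "\"" = -1 ∧ PySem.Str.find w "=" ≠ -1 then pvFixA w else w := by
  by_cases hq : '"' ∈ w.toList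
  · have hfind : ¬ PySem.Str.find w "\"" = -1 := by
      simp only [PySem.Str.find_eq]
      rw [show ("\"" : String).toList = ['"'] from rfl]
      exact (PySem.Chars.find_ne_neg_one_iff _ _).mpr ((List.singleton_infix_iff _ _).mpr hq)
    rw [if_neg (by tauto)]
    unfold pvFixB
    rw [if_pos]
    simp only [PySem.Str.isIn_eq, Bool.or_eq_true]
    left
    rw [show ("\"" : String).toList = ['"'] from rfl]
    rw [PySem.Chars.isIn_iff_infix]
    exact (List.singleton_infix_iff _ _).mpr hq
  · by_cases he : '=' ∈ w.toList
    · -- the fixing case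
      have hfindq : PySem.Str.find w "\"" = -1 := by
        simp only [PySem.Str.find_eq]
        rw [show ("\"" : String).toList = ['"'] from rfl, PySem.Chars.find_eq_neg_one_iff,
          List.singleton_infix_iff]
        exact hq
      have hfinde : PySem.Str.find w "=" ≠ -1 := by
        simp only [PySem.Str.find_eq]
        rw [show ("=" : String).toList = ['='] from rfl, Ne, PySem.Chars.find_eq_neg_one_iff,
          List.singleton_infix_iff]
        simp [he]
      rw [if_pos ⟨hfindq, hfinde⟩]
      unfold pvFixB
      rw [if_neg (by
        simp only [PySem.Str.isIn_eq, Bool.or_eq_true, Bool.not_eq_true']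
        rw [show ("\"" : String).toList = ['"'] from rfl, show ("=" : String).toList = ['='] from rfl]
        rintro (hc | hc)
        · rw [PySem.Chars.isIn_iff_infix, List.singleton_infix_iff] at hc; exact hq hc
        · rw [PySem.Chars.isIn_eq_false_iff, List.singleton_infix_iff] at hc; exact hc he)]
      unfold pvFixA
      rw [pv_pieces w '=' "=" rfl]
      rw [pvSplitC_cons_of_mem '=' _ he]
      apply String.toList_inj.mp
      simp only [String.toList_append, String.toList_ofList]
      rw [pv_pieces _ '=' "=" rfl]
      have htail : (String.ofList ((w.toList.dropWhile (fun c => c ≠ '=')).drop 1)).toList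
          = (w.toList.dropWhile (fun c => c ≠ '=')).drop 1 := String.toList_ofList
      rw [htail]
      simp only [pysem, List.getD_cons_zero, List.getD_cons_succ, String.toList_ofList,
        show ("=\"" : String).toList = ['=', '\"'] from rfl,
        show ("=" : String).toList = ['='] from rfl,
        show ("\"" : String).toList = ['\"'] from rfl]
      simp
    · -- no '=' in w: both sides w
      have hfinde : PySem.Str.find w "=" = -1 := by
        simp only [PySem.Str.find_eq]
        rw [show ("=" : String).toList = ['='] from rfl, PySem.Chars.find_eq_neg_one_iff,
          List.singleton_infix_iff]
        exact he
      rw [if_neg (by tauto)]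
      unfold pvFixB
      rw [if_pos]
      simp only [PySem.Str.isIn_eq, Bool.or_eq_true, Bool.not_eq_true']
      right
      rw [show ("=" : String).toList = ['='] from rfl, PySem.Chars.isIn_eq_false_iff,
        List.singleton_infix_iff]
      exact he

def pvCondW (x : String) : Bool :=
  decide (PySem.Str.find x "\"" = -1 ∧ PySem.Str.find x "=" ≠ -1)

def pvG (x : String) : String := if pvCondW x then pvFixA x else x

theorem pv_fixA_quote (x : String) : '"' ∈ (pvFixA x).toList := by
  unfold pvFixA
  simp [String.toList_append]

theorem pvG_idem (x : String) : pvG (pvG x) = pvG x := by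
  by_cases hc : pvCondW x = true
  · have hq : pvCondW (pvFixA x) = false := by
      unfold pvCondW
      simp only [decide_eq_false_iff_not]
      rintro ⟨h1, -⟩
      rw [PySem.Str.find_eq, show ("\"" : String).toList = ['"'] from rfl,
        PySem.Chars.find_eq_neg_one_iff, List.singleton_infix_iff] at h1
      exact h1 (pv_fixA_quote x)
    simp [pvG, hc, hq]
  · simp [pvG, hc]

theorem pv_fixB_eq_pvG (x : String) : pvFixB x = pvG x := by
  rw [pv_fix_eq]
  unfold pvG pvCondW
  split_ifs with h1 h2 h2
  · rfl
  · simp at h2; tauto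
  · simp at h2; tauto
  · rfl

theorem pv_join_split (line : String) :
    PySem.Str.join " " ((PySem.Str.split? line " ").getD []) = line := by
  rw [pv_pieces line ' ' " " rfl]
  apply String.toList_inj.mp
  rw [PySem.Str.toList_join]
  rw [List.map_map]
  have : (String.toList ∘ String.ofList) = id := by
    funext s; simp [String.toList_ofList]
  rw [this, List.map_id, show (" " : String).toList = [' '] from rfl, pv_join_splitC]

def pvCA (line : String) (j : Int) : Bool :=
  decide (PySem.Str.pyGet? line j = some '=' ∧ ¬ PySem.Str.pyGet? line (j + 1) = some '"')

-- the existential both scans characterize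
def pvP (line : String) : Prop :=
  ∃ k : Nat, ∃ h : k + 1 < line.toList.length,
    line.toList[k]'(by omega) = '=' ∧ line.toList[k + 1]'(by omega) ≠ '"'

theorem pv_anyA_iff (line : String) (h : PySem.Str.endswith line "=" = false) :
    ((PySem.List.pyRange 0 (PySem.Str.len line) 1).any (pvCA line) = true) ↔ pvP line := by
  rw [List.any_eq_true]
  constructor
  · rintro ⟨j, hj, hc⟩
    rw [PySem.List.mem_pyRange_one] at hj
    simp only [pvCA, decide_eq_true_eq] at hc
    obtain ⟨h1, h2⟩ := hc
    simp only [pysem] at h1 h2 hj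
    have hj0 : j = ((j.toNat : Nat) : Int) := by omega
    set k := j.toNat with hk
    have hklen : k < line.toList.length := by
      by_contra hcon
      rw [hj0] at h1
      rw [show PySem.List.pyGet? line.toList ((k : Nat) : Int) = none from by
        simp [pysem]; omega] at h1
      cases h1
    rw [hj0] at h1 h2
    rw [show PySem.List.pyGet? line.toList ((k : Nat) : Int) = some (line.toList[k]'hklen) from by
      simp [pysem, hklen]] at h1
    by_cases hlast : k + 1 < line.toList.length
    · refine ⟨k, hlast, by simpa using h1, ?_⟩
      intro hq
      apply h2
      have e2 : PySem.List.pyGet? line.toList ((k : Int) + 1) = some (line.toList[k + 1]'hlast) := by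
        rw [show ((k : Int) + 1) = (((k + 1 : Nat)) : Int) from by push_cast; ring,
          PySem.List.pyGet?_natCast]
        exact List.getElem?_eq_getElem hlast
      rw [e2, hq]
    · -- k is the last index and line[k] = '=': contradicts Pre
      exfalso
      have hkl : k + 1 = line.toList.length := by omega
      have hlastne : line.toList[k]'hklen ≠ '=' := by
        intro he
        have hsuf : ['='] <:+ line.toList := by
          refine ⟨line.toList.take k, ?_⟩
          rw [← he]
          have := List.take_concat_get (l := line.toList) (i := k) (h := by omega)
          simpa [List.concat_eq_append, show k + 1 = line.toList.length from hkl] using this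
        rw [← PySem.Chars.endswith_iff] at hsuf
        rw [PySem.Str.endswith_eq, show ("=" : String).toList = ['='] from rfl] at h
        rw [h] at hsuf
        cases hsuf
      exact hlastne (by simpa using h1)
  · rintro ⟨k, hk, h1, h2⟩
    refine ⟨(k : Int), ?_, ?_⟩
    · rw [PySem.List.mem_pyRange_one]
      simp only [pysem]
      omega
    · have e1 : PySem.Str.pyGet? line (k : Int) = some (line.toList[k]'(by omega)) := by
        simp [pysem, show k < line.toList.length from by omega]
      have e2 : PySem.Str.pyGet? line ((k : Int) + 1) = some (line.toList[k + 1]'hk) := by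
        rw [PySem.Str.pyGet?_eq, PySem.Chars.pyGet?_eq_listPyGet?,
          show ((k : Int) + 1) = (((k + 1 : Nat)) : Int) from by push_cast; ring,
          PySem.List.pyGet?_natCast]
        exact List.getElem?_eq_getElem hk
      simp only [pvCA, decide_eq_true_eq, e1, e2]
      constructor
      · simp [h1]
      · simp [h2]
theorem pv_anyB_iff (line : String) :
    ((line.toList.zip (PySem.List.slice line.toList (some 1) none)).any
      (fun p => p.1 == '=' && p.2 != '"') = true) ↔ pvP line := by
  rw [show ((1 : Int)) = ((1 : Nat) : Int) from rfl, PySem.List.slice_from_natCast]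
  rw [List.any_eq_true]
  constructor
  · rintro ⟨p, hp, hc⟩
    obtain ⟨i, hi, hpi⟩ := List.mem_iff_getElem.mp hp
    have hlen : i + 1 < line.toList.length := by
      simp only [List.length_zip, List.length_drop] at hi
      omega
    rw [List.getElem_zip] at hpi
    simp only [Bool.and_eq_true, beq_iff_eq, bne_iff_ne] at hc
    refine ⟨i, hlen, ?_, ?_⟩
    · rw [← hpi] at hc; simpa using hc.1
    · have : (line.toList.drop 1)[i]'(by rw [List.length_drop]; omega) = line.toList[1 + i]'(by omega) :=
        List.getElem_drop ..
      rw [← hpi] at hc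
      have h2 := hc.2
      simp only at h2
      rw [this] at h2
      simpa [show 1 + i = i + 1 from by omega] using h2
  · rintro ⟨k, hk, h1, h2⟩
    refine ⟨(line.toList[k]'(by omega), line.toList[k+1]'hk), ?_, ?_⟩
    · apply List.mem_iff_getElem.mpr
      refine ⟨k, by simp only [List.length_zip, List.length_drop]; omega, ?_⟩
      rw [List.getElem_zip]
      congr 1
      have : (line.toList.drop 1)[k]'(by rw [List.length_drop]; omega) = line.toList[1 + k]'(by omega) :=
        List.getElem_drop ..
      rw [this]
      congr 1
      omega
    · simp [h1, h2]


theorem pv_fold_ifmap {α : Type} (F : α → α) (hF : ∀ s, F (F s) = F s) (c : Int → Bool) :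
    ∀ (js : List Int) (s : α),
      js.foldl (fun s j => if c j then F s else s) s = if js.any c then F s else s := by
  intro js
  induction js with
  | nil => intro s; simp
  | cons j js ih =>
    intro s
    by_cases hj : c j = true
    · simp only [List.foldl_cons, List.any_cons, hj, if_pos, Bool.true_or, ih (F s)]
      split <;> simp [hF]
    · simp [hj, ih]

theorem pv_inner (s : List String) :
    (PySem.List.pyRange 0 ((s.length : Int)) 1).foldl
      (fun t o =>
        if PySem.Str.find (PySem.List.pyGetD t o "") "\"" = -1 ∧
            PySem.Str.find (PySem.List.pyGetD t o "") "=" ≠ -1 then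
          PySem.List.pySetD t o (pvFixA (PySem.List.pyGetD t o ""))
        else t) s = s.map pvG := by
  have hfs := pv_foldset_zero pvCondW pvFixA "" s
  have hbody :
      (fun (t : List String) (o : Int) =>
        if PySem.Str.find (PySem.List.pyGetD t o "") "\"" = -1 ∧
            PySem.Str.find (PySem.List.pyGetD t o "") "=" ≠ -1 then
          PySem.List.pySetD t o (pvFixA (PySem.List.pyGetD t o ""))
        else t)
      = (fun t o =>
        if pvCondW (PySem.List.pyGetD t o "") = true then
          PySem.List.pySetD t o (pvFixA (PySem.List.pyGetD t o ""))
        else t) := by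
    funext t o
    by_cases hc : PySem.Str.find (PySem.List.pyGetD t o "") "\"" = -1 ∧
        PySem.Str.find (PySem.List.pyGetD t o "") "=" ≠ -1
    · rw [if_pos hc, if_pos (by simp only [pvCondW, decide_eq_true_eq]; exact hc)]
    · rw [if_neg hc, if_neg (by simp only [pvCondW, decide_eq_true_eq]; exact hc)]
  rw [hbody, hfs]
  rfl

theorem pv_line_eq (line : String) (h : PySem.Str.endswith line "=" = false) :
    pvLineA line = pvLineB line := by
  have h0 : pvLineA line = PySem.Str.join " "
      ((PySem.List.pyRange 0 (PySem.Str.len line) 1).foldl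
        (fun (s : List String) (j : Int) =>
          if PySem.Str.pyGet? line j = some '=' then
            if PySem.Str.pyGet? line (j + 1) ≠ some '"' then
              (PySem.List.pyRange 0 ((s.length : Int)) 1).foldl
                (fun t o =>
                  if PySem.Str.find (PySem.List.pyGetD t o "") "\"" = -1 ∧
                      PySem.Str.find (PySem.List.pyGetD t o "") "=" ≠ -1 then
                    PySem.List.pySetD t o (pvFixA (PySem.List.pyGetD t o ""))
                  else t) s
            else s
          else s)
        ((PySem.Str.split? line " ").getD [])) := rfl
  rw [h0]
  unfold pvLineB
  have hbody2 :
      (fun (s : List String) (j : Int) =>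
        if PySem.Str.pyGet? line j = some '=' then
          if PySem.Str.pyGet? line (j + 1) ≠ some '"' then
            (PySem.List.pyRange 0 ((s.length : Int)) 1).foldl
              (fun t o =>
                if PySem.Str.find (PySem.List.pyGetD t o "") "\"" = -1 ∧
                    PySem.Str.find (PySem.List.pyGetD t o "") "=" ≠ -1 then
                  PySem.List.pySetD t o (pvFixA (PySem.List.pyGetD t o ""))
                else t) s
          else s
        else s)
      = fun s j => if pvCA line j = true then s.map pvG else s := by
    funext s j
    rw [pv_inner s]
    by_cases h1 : PySem.Str.pyGet? line j = some '='
    · by_cases h2 : PySem.Str.pyGet? line (j + 1) = some '"'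
      · rw [if_pos h1, if_neg (not_not_intro h2),
          if_neg (by simp only [pvCA, decide_eq_true_eq]; tauto)]
      · rw [if_pos h1, if_pos h2,
          if_pos (by simp only [pvCA, decide_eq_true_eq]; exact ⟨h1, h2⟩)]
    · rw [if_neg h1, if_neg (by simp only [pvCA, decide_eq_true_eq]; tauto)]
  rw [hbody2]
  have hidem : ∀ s : List String, (fun s => s.map pvG) ((fun s => s.map pvG) s)
      = (fun s : List String => s.map pvG) s := by
    intro s
    simp only [List.map_map]
    rw [show (pvG ∘ pvG) = pvG from funext pvG_idem]
  have hfold := pv_fold_ifmap (fun s : List String => s.map pvG) hidem (pvCA line)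
    (PySem.List.pyRange 0 (PySem.Str.len line) 1) ((PySem.Str.split? line " ").getD [])
  simp only [] at hfold
  rw [hfold]
  have hany : (PySem.List.pyRange 0 (PySem.Str.len line) 1).any (pvCA line)
      = ((line.toList.zip (PySem.List.slice line.toList (some 1) none)).any
          (fun p => p.1 == '=' && p.2 != '"')) := by
    rw [Bool.eq_iff_iff, pv_anyA_iff line h, pv_anyB_iff]
  by_cases hA : (PySem.List.pyRange 0 (PySem.Str.len line) 1).any (pvCA line) = true
  · rw [if_pos hA, if_pos (by rw [← hany]; exact hA)]
    congr 1
    rw [show ((PySem.Str.split? line " ").getD []).map pvFixB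
        = ((PySem.Str.split? line " ").getD []).map pvG from by
      congr 1; exact funext pv_fixB_eq_pvG]
  · rw [if_neg hA, if_neg (by rw [← hany]; exact hA)]
    exact pv_join_split line

theorem pv_top (arr : List String) :
    (PySem.List.pyRange 0 ((arr.length : Int)) 1).foldl
      (fun a i => PySem.List.pySetD a i (pvLineA (PySem.List.pyGetD a i ""))) arr
    = arr.map pvLineA := by
  have hfs := pv_foldset_zero (fun _ : String => true) pvLineA "" arr
  simpa using hfs

-- ===== VERDICT (by name: the statement is the Claim_ definition above) =====
theorem addApostroph_spec : Claim_equal_addApostroph := by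
  intro arr _ hpre
  show addApostroph arr = addApostroph_alt arr
  unfold addApostroph addApostroph_alt
  rw [pv_top arr]
  congr 1
  apply List.map_congr_left
  intro s hs
  exact pv_line_eq s (hpre s hs)
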